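-- pv_equiv track=rewrite | github.com/Aishwary-11/hybrid-ai-financial-platfor | app/api/v1/endpoints/hybrid_ai.py | _get_validation_recommendations
-- ===== SOURCE A (Python) =====
-- from typing import Dict, List, Optional, Any
--
-- def _get_validation_recommendations(issues: List[str]) -> List[str]:
--     """Get recommendations based on validation issues"""
--     recommendations = []
--
--     for issue in issues:
--         if "structure" in issue.lower():
--             recommendations.append("Review output format and ensure all required fields are present")
--         elif "confidence" in issue.lower():
--             recommendations.append("Recalibrate confidence scoring mechanism")
--         elif "hallucination" in issue.lower():
--             recommendations.append("Implement additional fact-checking against trusted sources")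
--         else:
--             recommendations.append("Review model training data and validation logic")
--
--     return recommendations
-- ===== SOURCE B (Python) =====
-- _DEFAULT = "Review model training data and validation logic"
-- # lowest priority first: later (higher-priority) passes overwrite earlier ones
-- _PRIORITY_LOW_TO_HIGH = (
--     ("hallucination", "Implement additional fact-checking against trusted sources"),
--     ("confidence", "Recalibrate confidence scoring mechanism"),
--     ("structure", "Review output format and ensure all required fields are present"),
-- )
--
-- def _get_validation_recommendations(issues):
--     """Get recommendations based on validation issues"""
--     lowered = [issue.lower() for issue in issues]
--     recs = [_DEFAULT] * len(lowered)
--     for kw, rec in _PRIORITY_LOW_TO_HIGH: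
--         recs = [rec if kw in low else old for low, old in zip(lowered, recs)]
--     return recs
-- ===== Notes on version B (the rewrite author's own statement) =====
-- stated objective: alternative
-- what changed: Keyword-major staged passes: start from a list of defaults and sweep one keyword at a time in reverse priority order, overwriting matches, so the highest-priority keyword wins last, instead of A's issue-major if/elif ladder.
import Mathlib
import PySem

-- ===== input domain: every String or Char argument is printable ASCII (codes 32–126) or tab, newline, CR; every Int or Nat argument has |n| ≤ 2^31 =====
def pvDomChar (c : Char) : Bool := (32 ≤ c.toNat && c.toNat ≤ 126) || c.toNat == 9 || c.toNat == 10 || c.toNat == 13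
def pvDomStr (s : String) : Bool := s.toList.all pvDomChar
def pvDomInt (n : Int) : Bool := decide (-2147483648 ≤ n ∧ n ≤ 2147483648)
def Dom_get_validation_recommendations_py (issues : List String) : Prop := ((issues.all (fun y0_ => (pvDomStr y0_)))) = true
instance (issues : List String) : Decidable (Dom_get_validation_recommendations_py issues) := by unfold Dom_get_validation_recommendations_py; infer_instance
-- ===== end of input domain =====

-- B replaces A's issue-major if/elif ladder with keyword-major overwrite passes (lowest priority first); same cost, different traversal.
-- ===== PORT A =====
def get_validation_recommendations_py (issues : List String) : List String :=
  issues.foldl (fun recommendations issue =>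
    if PySem.Str.isIn "structure" (PySem.Str.lower issue) then
      recommendations ++ ["Review output format and ensure all required fields are present"]
    else if PySem.Str.isIn "confidence" (PySem.Str.lower issue) then
      recommendations ++ ["Recalibrate confidence scoring mechanism"]
    else if PySem.Str.isIn "hallucination" (PySem.Str.lower issue) then
      recommendations ++ ["Implement additional fact-checking against trusted sources"]
    else
      recommendations ++ ["Review model training data and validation logic"]) []

-- ===== PORT B =====
def pvDefault : String := "Review model training data and validation logic"

def pvPriorityLowToHigh : List (String × String) :=
  [("hallucination", "Implement additional fact-checking against trusted sources"),
   ("confidence", "Recalibrate confidence scoring mechanism"),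
   ("structure", "Review output format and ensure all required fields are present")]

def get_validation_recommendations_py_alt (issues : List String) : List String :=
  let lowered := issues.map PySem.Str.lower
  pvPriorityLowToHigh.foldl
    (fun recs p =>
      (lowered.zip recs).map (fun q => if PySem.Str.isIn p.1 q.1 then p.2 else q.2))
    (List.replicate lowered.length pvDefault)

-- ===== PRECONDITION & SPEC =====
def Spec_get_validation_recommendations_py (issues : List String) (out : List String) : Prop := out = get_validation_recommendations_py_alt issues
instance (issues : List String) (out : List String) : Decidable (Spec_get_validation_recommendations_py issues out) := by unfold Spec_get_validation_recommendations_py; infer_instance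

-- ===== CLAIM (what is proved, stated in full; the proofs are below) =====
def Claim_equal_get_validation_recommendations_py : Prop := ∀ (issues : List String), Dom_get_validation_recommendations_py issues → Spec_get_validation_recommendations_py issues (get_validation_recommendations_py issues)

-- ===== LEMMAS AND PROOFS =====

-- A's loop body, as a per-element function.
def pvStepA (issue : String) : String :=
  if PySem.Str.isIn "structure" (PySem.Str.lower issue) then
    "Review output format and ensure all required fields are present"
  else if PySem.Str.isIn "confidence" (PySem.Str.lower issue) then
    "Recalibrate confidence scoring mechanism"
  else if PySem.Str.isIn "hallucination" (PySem.Str.lower issue) then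
    "Implement additional fact-checking against trusted sources"
  else
    "Review model training data and validation logic"

-- A's append-accumulator fold is (acc ++ map pvStepA issues).
theorem pvFoldA_eq (issues : List String) (acc : List String) :
    issues.foldl (fun recommendations issue =>
      if PySem.Str.isIn "structure" (PySem.Str.lower issue) then
        recommendations ++ ["Review output format and ensure all required fields are present"]
      else if PySem.Str.isIn "confidence" (PySem.Str.lower issue) then
        recommendations ++ ["Recalibrate confidence scoring mechanism"]
      else if PySem.Str.isIn "hallucination" (PySem.Str.lower issue) then
        recommendations ++ ["Implement additional fact-checking against trusted sources"]
      else
        recommendations ++ ["Review model training data and validation logic"]) acc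
    = acc ++ issues.map pvStepA := by
  induction issues generalizing acc with
  | nil => simp
  | cons h t ih =>
    simp only [List.foldl, List.map]
    rw [ih]
    simp [pvStepA]
    split_ifs <;> simp

-- One overwrite pass on a mapped list acts pointwise.
theorem pvPass_map (lowered : List String) (h : String → String) (kw rec : String) :
    (lowered.zip (lowered.map h)).map
        (fun q => if PySem.Str.isIn kw q.1 then rec else q.2)
      = lowered.map (fun x => if PySem.Str.isIn kw x then rec else h x) := by
  have hz : lowered.zip (lowered.map h) = lowered.map (fun x => (x, h x)) := by
    induction lowered with
    | nil => rfl
    | cons a t ih => simp [ih]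
  rw [hz, List.map_map]
  rfl

-- ===== VERDICT (by name: the statement is the Claim_ definition above) =====
theorem get_validation_recommendations_py_spec : Claim_equal_get_validation_recommendations_py := by
  intro issues _
  unfold Spec_get_validation_recommendations_py get_validation_recommendations_py get_validation_recommendations_py_alt
  rw [pvFoldA_eq]
  simp only [List.nil_append, pvPriorityLowToHigh, List.foldl]
  rw [← List.map_const']
  rw [pvPass_map, pvPass_map, pvPass_map, List.map_map]
  refine List.map_congr_left (fun issue _ => ?_)
  simp only [Function.comp, pvStepA, pvDefault]
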